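-- pv_equiv track=rewrite | github.com/GigikerJD/Mes_projets_Python | Maths for Crypto 2.py | DecFacPremier
-- ===== SOURCE A (Python) =====
-- def prime_factors(n):
--     prime = []
--     d = 2
--     while d * d <= n:
--         while (n % d) == 0:
--             prime.append(d)
--             n //= d
--         d += 1
--     if n > 1:
--         prime.append(n)
--     return prime
--
-- def hashe(l):
--     a = sorted(set(l), key=l.index)
--     return a
--
-- def power(n, l):
--     a = l.count(n)
--     return a
--
-- def DecFacPremier(n):
--     p = prime_factors(n)
--     a = hashe(p)
--     x = ""
--     for i in range(len(a)):
--         x = x + (str(a[i]) + '^' + '{' + str(power(a[i], p))) + '}'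
--         if i != len(a) - 1:
--             x = x + '\\' + 'times'
--     return x
-- ===== SOURCE B (Python) =====
-- def DecFacPremier(n):
--     def go(m, d):
--         while d * d <= m:
--             if m % d == 0:
--                 e = 0
--                 while m % d == 0:
--                     e += 1
--                     m //= d
--                 return ['%d^{%d}' % (d, e)] + go(m, d + 1)
--             d += 1
--         return ['%d^{1}' % m] if m > 1 else []
--     return '\\times'.join(go(n, 2))
-- ===== Notes on version B (the rewrite author's own statement) =====
-- stated objective: simpler
-- what changed: B is a single recursive decomposition per distinct prime: it scans for the next prime factor, extracts its whole exponent while dividing n down, emits the formatted 'p^{e}' fragment immediately and recurses on the quotient, then joins once - no flat factor list, no sorted(set, key=index) dedup pass, no per-prime list.count rescans and no index-based separator logic.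
import Mathlib
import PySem

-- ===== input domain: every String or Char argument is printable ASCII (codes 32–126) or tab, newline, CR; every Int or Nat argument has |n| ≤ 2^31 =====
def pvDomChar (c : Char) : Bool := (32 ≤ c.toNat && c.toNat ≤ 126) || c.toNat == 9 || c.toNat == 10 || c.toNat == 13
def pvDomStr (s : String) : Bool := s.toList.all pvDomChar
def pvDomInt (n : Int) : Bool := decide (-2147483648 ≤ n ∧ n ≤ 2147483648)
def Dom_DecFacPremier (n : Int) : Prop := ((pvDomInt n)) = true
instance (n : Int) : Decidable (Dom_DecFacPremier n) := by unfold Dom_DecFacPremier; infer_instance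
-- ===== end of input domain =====

-- B replaces A's staged passes (flat factor list, sorted(set, key=index) dedup, per-prime
-- .count rescans, index-based separator logic) by one recursion per distinct prime that
-- extracts the exponent while dividing n down, formats the fragment at once, and joins (simpler).

-- ===== PORT A =====
-- inner 'while (n % d) == 0' of prime_factors; fuel only makes the recursion total,
-- it is never exhausted for |n| ≤ 2^31 with the fuel chosen below
def pfInnerA : Nat → Int → Int → List Int → Int × List Int
  | 0, n, _, prime => (n, prime)
  | f + 1, n, d, prime =>
    if PySem.Int.mod n d == 0 then
      pfInnerA f (PySem.Int.floordiv n d) d (prime ++ [d])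
    else (n, prime)

-- outer 'while d * d <= n' of prime_factors
def pfOuterA : Nat → Int → Int → List Int → Int × List Int
  | 0, n, _, prime => (n, prime)
  | f + 1, n, d, prime =>
    if d * d ≤ n then
      let r := pfInnerA (f + 1) n d prime
      pfOuterA f r.1 (d + 1) r.2
    else (n, prime)

def prime_factorsA (n : Int) : List Int :=
  let r := pfOuterA (n.toNat + 2) n 2 []
  if r.1 > 1 then r.2 ++ [r.1] else r.2

-- hashe: sorted(set(l), key=l.index); every element of set(l) is in l, so l.index never
-- raises and the '.getD 0' default is never used
def hasheA (l : List Int) : List Int :=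
  PySem.List.sorted (PySem.Set.ofList l) (fun x => (PySem.List.index? l x).getD 0)

def powerA (n : Int) (l : List Int) : Int :=
  (PySem.List.count l n : Int)

def DecFacPremier (n : Int) : String :=
  let p := prime_factorsA n
  let a := hasheA p
  (PySem.List.pyRange 0 a.length 1).foldl
    (fun x i =>
      -- a[i]: i ∈ range(len(a)) is always in range, so the '.getD' default is never used
      let x := x ++ (PySem.Int.toStr (PySem.List.pyGetD a i 0) ++ "^" ++ "{"
                      ++ PySem.Int.toStr (powerA (PySem.List.pyGetD a i 0) p)) ++ "}"
      if i ≠ (a.length : Int) - 1 then x ++ "\\" ++ "times" else x)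
    ""

-- ===== PORT B =====
-- inner 'while m % d == 0: e += 1; m //= d' of go: returns (e, reduced m)
def bExp : Nat → Int → Int → Int × Int
  | 0, m, _ => (0, m)
  | f + 1, m, d =>
    if PySem.Int.mod m d == 0 then
      let r := bExp f (PySem.Int.floordiv m d) d
      (r.1 + 1, r.2)
    else (0, m)

-- go(m, d): the scanning while-loop is the tail recursion on d + 1, the per-prime
-- recursive call recurses on the reduced m; fuel only makes the recursion total and is
-- never exhausted for |n| ≤ 2^31 with the fuel chosen below (fuel 0 returns the same
-- residual base case the scan ends with)
def bGo : Nat → Int → Int → List String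
  | 0, m, _ => if m > 1 then [PySem.Int.toStr m ++ "^{1}"] else []
  | f + 1, m, d =>
    if d * d ≤ m then
      if PySem.Int.mod m d == 0 then
        let r := bExp (f + 1) m d
        (PySem.Int.toStr d ++ "^{" ++ PySem.Int.toStr r.1 ++ "}") :: bGo f r.2 (d + 1)
      else bGo f m (d + 1)
    else if m > 1 then [PySem.Int.toStr m ++ "^{1}"] else []

def DecFacPremier_alt (n : Int) : String :=
  PySem.Str.join "\\times" (bGo (n.toNat + 2) n 2)

-- ===== PRECONDITION & SPEC =====
def Spec_DecFacPremier (n : Int) (out : String) : Prop := out = DecFacPremier_alt n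
instance (n : Int) (out : String) : Decidable (Spec_DecFacPremier n out) := by unfold Spec_DecFacPremier; infer_instance

-- ===== CLAIM (what is proved, stated in full; the proofs are below) =====
def Claim_equal_DecFacPremier : Prop := ∀ (n : Int), Dom_DecFacPremier n → Spec_DecFacPremier n (DecFacPremier n)

-- ===== LEMMAS AND PROOFS =====

-- the common normal form both programs are reduced to: the distinct factors in first
-- appearance order, each rendered with its multiplicity in the flat factor list
def fragsOf (l : List Int) : List String :=
  (PySem.Set.ofList l).map
    (fun v => PySem.Int.toStr v ++ "^{" ++ PySem.Int.toStr ((l.count v : Int)) ++ "}")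

-- A's flat factor list from an intermediate state (same shape as prime_factorsA)
def flatA (f : Nat) (m d : Int) : List Int :=
  let r := pfOuterA f m d []
  if r.1 > 1 then r.2 ++ [r.1] else r.2


-- ---- string reshaping ----

-- B's residual fragment in fragsOf's shape
theorem frag_one (x : String) : x ++ "^{" ++ PySem.Int.toStr 1 ++ "}" = x ++ "^{1}" := by
  rw [String.append_assoc, String.append_assoc]; congr 1

-- A's fragment reassociated to fragsOf's shape
theorem frag_assoc (x c : String) :
    (x ++ "^" ++ "{" ++ c) ++ "}" = x ++ "^{" ++ c ++ "}" := by
  simp [String.append_assoc]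

theorem fragsOf_singleton (m : Int) :
    fragsOf [m] = [PySem.Int.toStr m ++ "^{1}"] := by
  have h : PySem.Set.ofList [m] = [m] := rfl
  simp only [fragsOf, h, List.map_cons, List.map_nil, List.count_cons_self, List.count_nil]
  rw [show ((0 + 1 : Nat) : Int) = 1 by norm_num, frag_one]

-- ---- B's exponent loop ----

theorem bExp_nonneg (f : Nat) : ∀ (m d : Int), 0 ≤ (bExp f m d).1 := by
  induction f with
  | zero => intro m d; simp [bExp]
  | succ f ih =>
    intro m d
    simp only [bExp]
    split
    · have := ih (PySem.Int.floordiv m d) d; dsimp only; omega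
    · simp

-- exact division when the loop guard held
theorem floordiv_exact (m d : Int) (h : PySem.Int.mod m d = 0) :
    PySem.Int.floordiv m d * d = m := by
  have := PySem.Int.floordiv_mul_add_mod m d
  omega

theorem bExp_pos_le (f : Nat) : ∀ (m d : Int), 2 ≤ d → 0 < m →
    0 < (bExp f m d).2 ∧ (bExp f m d).2 ≤ m := by
  induction f with
  | zero => intro m d _ hm; exact ⟨hm, le_refl m⟩
  | succ f ih =>
    intro m d hd hm
    simp only [bExp]
    split
    · rename_i hmod
      have hex := floordiv_exact m d (by simpa [beq_iff_eq] using hmod)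
      have hq : 0 < PySem.Int.floordiv m d := by nlinarith
      have hle : PySem.Int.floordiv m d ≤ m := by nlinarith
      have := ih (PySem.Int.floordiv m d) d hd hq
      exact ⟨this.1, le_trans this.2 hle⟩
    · exact ⟨hm, le_refl m⟩

theorem bExp_dvd (f : Nat) : ∀ (m d : Int), 2 ≤ d → (bExp f m d).2 ∣ m := by
  induction f with
  | zero => intro m d _; simp [bExp]
  | succ f ih =>
    intro m d hd
    simp only [bExp]
    split
    · rename_i hmod
      have hex := floordiv_exact m d (by simpa [beq_iff_eq] using hmod)
      exact dvd_trans (ih (PySem.Int.floordiv m d) d hd) ⟨d, hex.symm⟩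
    · exact dvd_refl m

-- with fuel f > log_d m the exponent loop really exhausts all factors d
theorem bExp_not_dvd (f : Nat) : ∀ (m d : Int), 2 ≤ d → 0 < m → m < d ^ f →
    ¬ d ∣ (bExp f m d).2 := by
  induction f with
  | zero => intro m d _ hm hlt; simp only [pow_zero] at hlt; omega
  | succ f ih =>
    intro m d hd hm hlt
    simp only [bExp]
    split
    · rename_i hmod
      have hex := floordiv_exact m d (by simpa [beq_iff_eq] using hmod)
      have hq : 0 < PySem.Int.floordiv m d := by nlinarith
      have hql : PySem.Int.floordiv m d < d ^ f := by
        have hp : d ^ (f + 1) = d ^ f * d := by ring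
        nlinarith
      exact ih (PySem.Int.floordiv m d) d hd hq hql
    · rename_i hmod
      intro hdvd
      exact hmod (by simp [(PySem.Int.mod_eq_zero_iff_dvd m d).mpr hdvd])

-- ---- aligning A's loops with B's ----

-- A's inner loop only appends to its accumulator
theorem pfInnerA_append (f : Nat) : ∀ (n d : Int) (acc : List Int),
    pfInnerA f n d acc = ((pfInnerA f n d []).1, acc ++ (pfInnerA f n d []).2) := by
  induction f with
  | zero => intro n d acc; simp [pfInnerA]
  | succ f ih =>
    intro n d acc
    simp only [pfInnerA]
    split
    · simp only [List.nil_append]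
      rw [ih _ _ (acc ++ [d]), ih _ _ [d]]
      simp
    · simp

theorem pfOuterA_append (f : Nat) : ∀ (n d : Int) (acc : List Int),
    pfOuterA f n d acc = ((pfOuterA f n d []).1, acc ++ (pfOuterA f n d []).2) := by
  induction f with
  | zero => intro n d acc; simp [pfOuterA]
  | succ f ih =>
    intro n d acc
    simp only [pfOuterA]
    split
    · rw [pfInnerA_append (f+1) n d acc, pfInnerA_append (f+1) n d []]
      simp only [List.nil_append]
      rw [ih _ _ (acc ++ (pfInnerA (f+1) n d []).2), ih _ _ ((pfInnerA (f+1) n d []).2)]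
      simp
    · simp

-- A's inner loop is B's exponent loop: same reduced n, having appended d exactly e times
theorem pfInnerA_eq_bExp (f : Nat) : ∀ (m d : Int),
    pfInnerA f m d [] = ((bExp f m d).2, List.replicate (bExp f m d).1.toNat d) := by
  induction f with
  | zero => intro m d; simp [pfInnerA, bExp]
  | succ f ih =>
    intro m d
    simp only [pfInnerA, bExp]
    split
    · simp only [List.nil_append]
      rw [pfInnerA_append f _ d [d], ih]
      have h0 := bExp_nonneg f (PySem.Int.floordiv m d) d
      have h1 : ((bExp f (PySem.Int.floordiv m d) d).1 + 1).toNat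
          = (bExp f (PySem.Int.floordiv m d) d).1.toNat + 1 := by omega
      simp [h1, List.replicate_succ]
    · simp

-- every factor pfOuterA records from divisor d on is at least d
theorem pfOuterA_ge (f : Nat) : ∀ (m d : Int), ∀ x ∈ (pfOuterA f m d []).2, d ≤ x := by
  induction f with
  | zero => intro m d x hx; simp [pfOuterA] at hx
  | succ f ih =>
    intro m d x hx
    simp only [pfOuterA] at hx
    split at hx
    · rw [pfInnerA_eq_bExp, pfOuterA_append] at hx
      simp only [List.mem_append, List.mem_replicate] at hx
      rcases hx with h | h
      · omega
      · have := ih _ (d + 1) x h; omega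
    · simp at hx

-- the residual pfOuterA leaves divides (and stays positive in) the n it started from
theorem pfOuterA_res (f : Nat) : ∀ (m d : Int), 2 ≤ d → 0 < m →
    (pfOuterA f m d []).1 ∣ m ∧ 0 < (pfOuterA f m d []).1 := by
  induction f with
  | zero => intro m d _ hm; exact ⟨dvd_refl m, hm⟩
  | succ f ih =>
    intro m d hd hm
    simp only [pfOuterA]
    split
    · rw [pfInnerA_eq_bExp, pfOuterA_append]
      have h1 := bExp_pos_le (f + 1) m d hd hm
      have h2 := bExp_dvd (f + 1) m d hd
      have h3 := ih (bExp (f + 1) m d).2 (d + 1) (by omega) h1.1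
      exact ⟨dvd_trans h3.1 h2, h3.2⟩
    · exact ⟨dvd_refl m, hm⟩

-- ---- set(l) grouping: a block of d's followed by a d-free tail ----

theorem foldl_add_cons (d : Int) : ∀ (rest s : List Int), d ∉ rest →
    rest.foldl PySem.Set.add (d :: s) = d :: rest.foldl PySem.Set.add s := by
  intro rest
  induction rest with
  | nil => intro s _; simp
  | cons x xs ih =>
    intro s hd
    simp only [List.mem_cons, not_or] at hd
    have hx : PySem.Set.add (d :: s) x = d :: PySem.Set.add s x := by
      by_cases hxs : x ∈ s
      · rw [PySem.Set.add_of_mem hxs, PySem.Set.add_of_mem (by simp [hxs])]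
      · rw [PySem.Set.add_of_not_mem hxs,
            PySem.Set.add_of_not_mem (by simp [hxs, Ne.symm hd.1])]
        rfl
    simp only [List.foldl_cons, hx]
    exact ih _ hd.2

theorem foldl_add_replicate (d : Int) (k : Nat) : ∀ (s : List Int), d ∈ s →
    (List.replicate k d).foldl PySem.Set.add s = s := by
  induction k with
  | zero => intro s _; simp
  | succ k ih =>
    intro s hd
    simp only [List.replicate_succ, List.foldl_cons, PySem.Set.add_of_mem hd]
    exact ih s hd

theorem ofList_group (k : Nat) (hk : 1 ≤ k) (d : Int) (rest : List Int) (hd : d ∉ rest) :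
    PySem.Set.ofList (List.replicate k d ++ rest) = d :: PySem.Set.ofList rest := by
  obtain ⟨k', rfl⟩ : ∃ k', k = k' + 1 := ⟨k - 1, by omega⟩
  rw [PySem.Set.ofList_eq_foldl, PySem.Set.ofList_eq_foldl, List.foldl_append]
  have h1 : (List.replicate (k' + 1) d).foldl PySem.Set.add ([] : List Int) = [d] := by
    simp only [List.replicate_succ, List.foldl_cons]
    exact foldl_add_replicate d k' [d] (by simp)
  rw [h1]
  exact foldl_add_cons d rest [] hd

theorem fragsOf_group (k : Nat) (hk : 1 ≤ k) (d : Int) (rest : List Int) (hd : d ∉ rest) :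
    fragsOf (List.replicate k d ++ rest)
      = (PySem.Int.toStr d ++ "^{" ++ PySem.Int.toStr (k : Int) ++ "}") :: fragsOf rest := by
  unfold fragsOf
  rw [ofList_group k hk d rest hd, List.map_cons]
  congr 1
  · have hc : (List.replicate k d ++ rest).count d = k := by
      rw [List.count_append, List.count_replicate_self, List.count_eq_zero_of_not_mem hd]
      omega
    rw [hc]
  · apply List.map_congr_left
    intro v hv
    have hvr : v ∈ rest := (PySem.Set.mem_ofList rest v).mp hv
    have hne : v ≠ d := fun h => hd (h ▸ hvr)
    have hc : (List.replicate k d ++ rest).count v = rest.count v := by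
      rw [List.count_append, List.count_replicate, if_neg (by simpa using hne.symm)]
      omega
    rw [hc]

-- ---- main B-side lemma: bGo computes fragsOf of A's flat factor list ----

theorem bGo_eq (f : Nat) : ∀ (m d : Int), 2 ≤ d → m.toNat + 4 ≤ f + d.toNat →
    bGo f m d = fragsOf (flatA f m d) := by
  induction f with
  | zero =>
    intro m d _ _
    simp only [bGo, flatA, pfOuterA]
    split
    · simp [fragsOf_singleton]
    · simp [fragsOf]
  | succ f ih =>
    intro m d hd hfuel
    simp only [bGo, flatA, pfOuterA]
    by_cases h1 : d * d ≤ m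
    · rw [if_pos h1, if_pos h1]
      have hm4 : 4 ≤ m := by nlinarith
      by_cases h2 : PySem.Int.mod m d = 0
      · rw [if_pos (by simpa [beq_iff_eq] using h2)]
        -- abbreviations for B's exponent loop result
        set e := (bExp (f + 1) m d).1 with he
        set m' := (bExp (f + 1) m d).2 with hm'
        have hpos := bExp_pos_le (f + 1) m d hd (by omega)
        have he1 : 1 ≤ e := by
          have h2' : (PySem.Int.mod m d == 0) = true := by simp [h2]
          rw [he]
          simp only [bExp, h2', if_true]
          show 1 ≤ (bExp f (PySem.Int.floordiv m d) d).1 + 1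
          have := bExp_nonneg f (PySem.Int.floordiv m d) d
          omega
        -- fuel bound gives d^(f+1) > m, so all factors d are exhausted
        have hnd : ¬ d ∣ m' := by
          apply bExp_not_dvd (f + 1) m d hd (by omega)
          have h2d : 2 * d ≤ m := by nlinarith
          have hD : d.toNat * 2 ≤ m.toNat := by omega
          have hhalf : m.toNat / 2 + 4 ≤ f + 1 + 2 := by omega
          have hp1 : m.toNat / 2 < 2 ^ (m.toNat / 2) := Nat.lt_two_pow_self
          have hp2 : (2 : Nat) ^ (m.toNat / 2) * 4 ≤ 2 ^ (m.toNat / 2 + 2) := by ring_nf; omega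
          have hp3 : (2 : Nat) ^ (m.toNat / 2 + 2) ≤ 2 ^ (f + 1) :=
            Nat.pow_le_pow_right (by omega) (by omega)
          have hn : m.toNat < 2 ^ (f + 1) := by omega
          have hi : (m : Int) < (2 : Int) ^ (f + 1) := by
            have : ((m.toNat : Int)) < ((2 ^ (f + 1) : Nat) : Int) := by exact_mod_cast hn
            push_cast at this
            omega
          calc (m : Int) < (2 : Int) ^ (f + 1) := hi
            _ ≤ d ^ (f + 1) := by
                exact pow_le_pow_left₀ (by norm_num) (by omega) (f + 1)
        -- rewrite A's step through the inner-loop correspondence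
        rw [pfInnerA_eq_bExp, pfOuterA_append]
        -- the tail A produces after this prime is d-free
        have hires := pfOuterA_res f m' (d + 1) (by omega) hpos.1
        have hnotin : d ∉ (flatA f m' (d + 1)) := by
          intro hmem
          simp only [flatA] at hmem
          have hmem' : d ∈ (pfOuterA f m' (d + 1) []).2 ∨ d = (pfOuterA f m' (d + 1) []).1 := by
            by_cases hb : (pfOuterA f m' (d + 1) []).1 > 1
            · rw [if_pos hb] at hmem
              rcases List.mem_append.mp hmem with h | h
              · exact Or.inl h
              · exact Or.inr (List.mem_singleton.mp h)
            · rw [if_neg hb] at hmem; exact Or.inl hmem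
          rcases hmem' with h | h
          · have := pfOuterA_ge f m' (d + 1) d h; omega
          · exact hnd (h ▸ hires.1)
        -- B's recursive call via the induction hypothesis
        have hmle : m'.toNat ≤ m.toNat := by omega
        have ihb := ih m' (d + 1) (by omega) (by omega)
        rw [ihb]
        -- fold A's residual append into flatA of the recursive state
        have hflat : (if (pfOuterA f m' (d + 1) []).1 > 1 then
              List.replicate e.toNat d ++ (pfOuterA f m' (d + 1) []).2 ++ [(pfOuterA f m' (d + 1) []).1]
            else List.replicate e.toNat d ++ (pfOuterA f m' (d + 1) []).2)
            = List.replicate e.toNat d ++ flatA f m' (d + 1) := by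
          simp only [flatA]
          split
          · rw [List.append_assoc]
          · rfl
        rw [hflat, fragsOf_group e.toNat (by omega) d _ hnotin]
        have hcast : ((e.toNat : Int)) = e := by omega
        rw [hcast]
      · rw [if_neg (by simpa [beq_iff_eq] using h2)]
        -- A's inner loop exits at once: pfInnerA (f+1) m d [] = (m, [])
        have hinner : pfInnerA (f + 1) m d [] = (m, []) := by
          simp [pfInnerA, beq_iff_eq, h2]
        rw [hinner]
        have := ih m (d + 1) (by omega) (by omega)
        rw [this]
        simp [flatA]
    · rw [if_neg h1, if_neg h1]
      split
      · simp [fragsOf_singleton]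
      · simp [fragsOf]

-- ---- A-side: the formatting loop is a join over fragsOf ----

theorem index_lt_len {l : List Int} {a : Int} (ha : a ∈ l) :
    (PySem.List.index? l a).getD 0 < l.length := by
  obtain ⟨k, hk⟩ := Option.isSome_iff_exists.mp ((PySem.List.index?_isSome_iff l a).mpr ha)
  obtain ⟨hlt, -, -⟩ := PySem.List.getElem_of_index?_eq_some hk
  rw [hk]; simpa using hlt

theorem pairwise_index_ofList (l : List Int) :
    List.Pairwise (fun a b => (PySem.List.index? l a).getD 0 < (PySem.List.index? l b).getD 0)
      (PySem.Set.ofList l) := by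
  induction l using List.reverseRecOn with
  | nil => simp [PySem.Set.ofList_eq_foldl]
  | append_singleton l x ih =>
    have hof : PySem.Set.ofList (l ++ [x]) = PySem.Set.add (PySem.Set.ofList l) x := by
      simp [PySem.Set.ofList_eq_foldl, List.foldl_append]
    have hkeep : List.Pairwise
        (fun a b => (PySem.List.index? (l ++ [x]) a).getD 0 < (PySem.List.index? (l ++ [x]) b).getD 0)
        (PySem.Set.ofList l) := by
      refine ih.imp_of_mem (fun {a b} ha hb hab => ?_)
      rw [PySem.List.index?_append_of_mem _ ((PySem.Set.mem_ofList l a).mp ha),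
          PySem.List.index?_append_of_mem _ ((PySem.Set.mem_ofList l b).mp hb)]
      exact hab
    by_cases hx : x ∈ l
    · have heq : PySem.Set.add (PySem.Set.ofList l) x = PySem.Set.ofList l := by
        simp [PySem.Set.add, PySem.Set.contains, (PySem.Set.mem_ofList l x).mpr hx]
      rw [hof, heq]; exact hkeep
    · have heq : PySem.Set.add (PySem.Set.ofList l) x = PySem.Set.ofList l ++ [x] := by
        simp [PySem.Set.add, PySem.Set.contains, (PySem.Set.mem_ofList l x)]
        intro h; exact absurd h hx
      rw [hof, heq, List.pairwise_append]
      refine ⟨hkeep, by simp, fun a ha b hb => ?_⟩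
      have hal : a ∈ l := (PySem.Set.mem_ofList l a).mp ha
      rw [List.mem_singleton] at hb
      rw [hb, PySem.List.index?_append_of_mem _ hal, PySem.List.index?_append_singleton_self l x hx]
      simpa using index_lt_len hal

-- hashe(l) is just set(l) in first-occurrence order
theorem hasheA_eq (l : List Int) : hasheA l = PySem.Set.ofList l :=
  PySem.List.sorted_eq_of_perm_of_pairwise_lt _ _ _ (List.Perm.refl _) (pairwise_index_ofList l)

theorem sjoin_nil (sep : String) : PySem.Str.join sep [] = "" := by
  simp [PySem.Str.join, PySem.Chars.join_nil]
theorem sjoin_singleton (sep p : String) : PySem.Str.join sep [p] = p := by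
  simp [PySem.Str.join, PySem.Chars.join_singleton]
theorem sjoin_cons_cons (sep p q : String) (r : List String) :
    PySem.Str.join sep (p :: q :: r) = p ++ sep ++ PySem.Str.join sep (q :: r) := by
  simp [PySem.Str.join, PySem.Chars.join_cons_cons, String.append_assoc]

theorem fold_sep_join_aux (g : Int → String) (sep : String) (a : List Int) :
    ∀ (k j : Nat) (acc : String), j + k = a.length →
    (PySem.List.pyRange (j : Int) (a.length : Int) 1).foldl
      (fun x i =>
        let x := x ++ g (PySem.List.pyGetD a i 0)
        if i ≠ (a.length : Int) - 1 then x ++ sep else x) acc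
    = acc ++ PySem.Str.join sep ((a.drop j).map g) := by
  intro k
  induction k with
  | zero =>
    intro j acc hj
    have h1 : PySem.List.pyRange (j : Int) (a.length : Int) 1 = [] := by
      have : (j : Int) = (a.length : Int) := by omega
      rw [this]
      simp [pysem]
    rw [h1]
    simp [List.drop_of_length_le (by omega : a.length ≤ j), sjoin_nil]
  | succ k ih =>
    intro j acc hj
    have hjl : j < a.length := by omega
    rw [PySem.List.pyRange_one_cons (by exact_mod_cast hjl)]
    rw [List.foldl_cons]
    have hget : PySem.List.pyGetD a (j : Int) 0 = a[j] := by
      rw [PySem.List.pyGetD_of_nonneg a 0 (by positivity)]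
      simp [List.getD_eq_getElem?_getD, hjl]
    have hdrop : a.drop j = a[j] :: a.drop (j + 1) := List.drop_eq_getElem_cons hjl
    have hpush : ((j : Int) + 1) = ((j + 1 : Nat) : Int) := by push_cast; ring
    by_cases hlast : j + 1 = a.length
    · have hcond : ¬ ((j : Int) ≠ (a.length : Int) - 1) := by omega
      have h2 : a.drop (j + 1) = [] := List.drop_of_length_le (by omega)
      simp only [hget, if_neg hcond]
      rw [hpush, ih (j + 1) _ (by omega), hdrop, h2]
      simp only [List.map_cons, List.map_nil]
      rw [sjoin_singleton, sjoin_nil, String.append_empty]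
    · have hcond : ((j : Int) ≠ (a.length : Int) - 1) := by omega
      have hne : a.drop (j + 1) ≠ [] := by
        simp [List.drop_eq_nil_iff]; omega
      obtain ⟨y, ys, hys⟩ := List.exists_cons_of_ne_nil hne
      simp only [hget, if_pos hcond]
      rw [hpush, ih (j + 1) _ (by omega), hdrop, hys]
      simp only [List.map_cons]
      rw [sjoin_cons_cons]
      simp [String.append_assoc]

-- A's whole formatting pass, reduced to a join over the common normal form
-- A's whole formatting pass, reduced to a join over the common normal form
theorem A_form (n : Int) :
    DecFacPremier n = PySem.Str.join "\\times" (fragsOf (prime_factorsA n)) := by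
  unfold DecFacPremier
  show (PySem.List.pyRange 0 ((hasheA (prime_factorsA n)).length : Int) 1).foldl
      (fun x i =>
        let x := x ++ (PySem.Int.toStr (PySem.List.pyGetD (hasheA (prime_factorsA n)) i 0) ++ "^" ++ "{"
                        ++ PySem.Int.toStr (powerA (PySem.List.pyGetD (hasheA (prime_factorsA n)) i 0)
                            (prime_factorsA n))) ++ "}"
        if i ≠ ((hasheA (prime_factorsA n)).length : Int) - 1 then x ++ "\\" ++ "times" else x) ""
    = PySem.Str.join "\\times" (fragsOf (prime_factorsA n))
  set p := prime_factorsA n with hp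
  have haux := fold_sep_join_aux
    (fun v => (PySem.Int.toStr v ++ "^" ++ "{" ++ PySem.Int.toStr (powerA v p)) ++ "}")
    "\\times" (hasheA p) (hasheA p).length 0 "" (by omega)
  simp only [Nat.cast_zero] at haux
  have hbody : (fun (x : String) (i : Int) =>
      let x := x ++ (PySem.Int.toStr (PySem.List.pyGetD (hasheA p) i 0) ++ "^" ++ "{"
                      ++ PySem.Int.toStr (powerA (PySem.List.pyGetD (hasheA p) i 0) p)) ++ "}"
      if i ≠ ((hasheA p).length : Int) - 1 then x ++ "\\" ++ "times" else x)
      = (fun (x : String) (i : Int) =>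
      let x := x ++ ((PySem.Int.toStr (PySem.List.pyGetD (hasheA p) i 0) ++ "^" ++ "{"
                      ++ PySem.Int.toStr (powerA (PySem.List.pyGetD (hasheA p) i 0) p)) ++ "}")
      if i ≠ ((hasheA p).length : Int) - 1 then x ++ "\\times" else x) := by
    funext x i
    simp [String.append_assoc]
  rw [hbody, haux]
  simp only [List.drop_zero]
  have h0 : ∀ s : String, "" ++ s = s := fun s => by simp
  rw [h0]
  unfold fragsOf
  rw [hasheA_eq]
  congr 1
  apply List.map_congr_left
  intro v _
  rw [frag_assoc]
  congr 3


-- ===== VERDICT (by name: the statement is the Claim_ definition above) =====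
theorem DecFacPremier_spec : Claim_equal_DecFacPremier := by
  intro n _
  unfold Spec_DecFacPremier
  rw [A_form n, DecFacPremier_alt]
  congr 1
  have h := bGo_eq (n.toNat + 2) n 2 (by norm_num) (by omega)
  rw [h]
  rfl
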